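-- pv_equiv track=rewrite | github.com/AvrahamMeyers/CPP_Practice | closest_with_weight.py | get_closest_value_with_same_weight
-- ===== SOURCE A (Python) =====
-- def get_closest_value_with_same_weight(value: int):
--     #find the first two bits that are not the same and then flip them
--
--     mask = 1
--     first_bit = value & mask != 0
--
--     mask <<= 1
--     next_bit = value & mask != 0
--
--     while first_bit == next_bit:
--         mask <<= 1
--         first_bit = next_bit
--         next_bit = value & mask != 0
--
--
--     mask |= mask >> 1
--
--     return value ^ mask
-- ===== SOURCE B (Python) =====
-- def get_closest_value_with_same_weight(value: int):
--     # closed form: lowest bit of d = value ^ (value >> 1) marks the lowest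
--     # adjacent pair of differing bits; flip that pair.
--     d = value ^ (value >> 1)
--     low = d & -d
--     return value ^ (low | (low << 1))
-- ===== Notes on version B (the rewrite author's own statement) =====
-- stated objective: simpler
-- what changed: Replaced A's while-loop that scans bit positions with two boolean state flags by a loop-free closed-form bit manipulation: d = value ^ (value >> 1) marks adjacent differing bit pairs, low = d & -d isolates the lowest one, and value ^ (low | low << 1) flips that pair.
-- outside the precondition, e.g. on get_closest_value_with_same_weight(0): A does not finish within the time limit, B returns 0; on get_closest_value_with_same_weight(-1): A does not finish within the time limit, B returns -1
import Mathlib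
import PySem

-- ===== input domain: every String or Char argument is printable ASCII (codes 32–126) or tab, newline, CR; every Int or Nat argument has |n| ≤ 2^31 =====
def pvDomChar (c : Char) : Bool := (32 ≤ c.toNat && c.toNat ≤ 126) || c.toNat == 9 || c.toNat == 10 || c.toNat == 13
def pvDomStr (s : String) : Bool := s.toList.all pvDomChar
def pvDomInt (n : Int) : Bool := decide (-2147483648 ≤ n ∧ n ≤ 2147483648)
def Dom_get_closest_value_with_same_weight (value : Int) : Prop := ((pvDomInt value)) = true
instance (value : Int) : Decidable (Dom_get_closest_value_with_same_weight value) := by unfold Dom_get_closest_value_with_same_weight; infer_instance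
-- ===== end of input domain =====

-- B replaces A's bit-scanning while-loop by the closed form value ^ (low | low<<1), low = d & -d, d = value ^ (value>>1) (objective: simpler).

-- ===== PORT A =====
def pvLoopA (value : Int) : Nat → Int → Bool → Bool → Int
  | 0, mask, _, _ => mask
  | fuel+1, mask, first_bit, next_bit =>
    if first_bit = next_bit then
      let mask := mask <<< (1 : Nat)
      pvLoopA value fuel mask next_bit (PySem.Int.band value mask != 0)
    else mask

def get_closest_value_with_same_weight (value : Int) : Int :=
  let mask : Int := 1
  let first_bit : Bool := PySem.Int.band value mask != 0
  let mask : Int := mask <<< (1 : Nat)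
  let next_bit : Bool := PySem.Int.band value mask != 0
  let mask : Int := pvLoopA value 64 mask first_bit next_bit
  let mask : Int := PySem.Int.bor mask (mask >>> (1 : Nat))
  PySem.Int.bxor value mask

-- ===== PORT B =====
def get_closest_value_with_same_weight_alt (value : Int) : Int :=
  let d : Int := PySem.Int.bxor value (value >>> (1 : Nat))
  let low : Int := PySem.Int.band d (-d)
  PySem.Int.bxor value (PySem.Int.bor low (low <<< (1 : Nat)))

-- ===== PRECONDITION & SPEC =====
-- Pre_ excludes exactly the inputs 0 and -1: there A's while-loop never finds a pair of
-- differing adjacent bits and Python A loops forever (A returns no value).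
def Pre_get_closest_value_with_same_weight (value : Int) : Prop := value ≠ 0 ∧ value ≠ -1
instance (value : Int) : Decidable (Pre_get_closest_value_with_same_weight value) := by unfold Pre_get_closest_value_with_same_weight; infer_instance
def pvWitness_get_closest_value_with_same_weight : Int := 5

def Spec_get_closest_value_with_same_weight (value : Int) (out : Int) : Prop := out = get_closest_value_with_same_weight_alt value
instance (value : Int) (out : Int) : Decidable (Spec_get_closest_value_with_same_weight value out) := by unfold Spec_get_closest_value_with_same_weight; infer_instance

-- ===== CLAIM (what is proved, stated in full; the proofs are below) =====
def Claim_equal_get_closest_value_with_same_weight : Prop := ∀ (value : Int), Dom_get_closest_value_with_same_weight value → Pre_get_closest_value_with_same_weight value → Spec_get_closest_value_with_same_weight value (get_closest_value_with_same_weight value)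

-- ===== LEMMAS AND PROOFS =====
lemma natAndHalf (e f : Bool) (m n : Nat) :
    (2*m + e.toNat) &&& (2*n + f.toNat) = 2*(m &&& n) + (e && f).toNat := by
  simpa [Nat.bit_val] using Nat.land_bit e m f n
lemma natOrHalf (e f : Bool) (m n : Nat) :
    (2*m + e.toNat) ||| (2*n + f.toNat) = 2*(m ||| n) + (e || f).toNat := by
  simpa [Nat.bit_val] using Nat.lor_bit e m f n
lemma natXorHalf (e f : Bool) (m n : Nat) :
    (2*m + e.toNat) ^^^ (2*n + f.toNat) = 2*(m ^^^ n) + (e != f).toNat := by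
  simpa [Nat.bit_val] using Nat.xor_bit e m f n

lemma natAndH00 (m n : Nat) : (2*m) &&& (2*n) = 2*(m &&& n) := by
  simpa only [Bool.toNat_true, Bool.toNat_false, Bool.and_true, Bool.and_false, Bool.true_and,
    Bool.false_and, Bool.or_true, Bool.or_false, Bool.true_or, Bool.false_or, bne_self_eq_false,
    Bool.false_bne, Bool.true_bne, Bool.not_true, Bool.not_false, Bool.bne_false, Bool.bne_true,
    Nat.add_zero] using natAndHalf false false m n

lemma natAndH01 (m n : Nat) : (2*m) &&& (2*n+1) = 2*(m &&& n) := by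
  simpa only [Bool.toNat_true, Bool.toNat_false, Bool.and_true, Bool.and_false, Bool.true_and,
    Bool.false_and, Bool.or_true, Bool.or_false, Bool.true_or, Bool.false_or, bne_self_eq_false,
    Bool.false_bne, Bool.true_bne, Bool.not_true, Bool.not_false, Bool.bne_false, Bool.bne_true,
    Nat.add_zero] using natAndHalf false true m n

lemma natAndH10 (m n : Nat) : (2*m+1) &&& (2*n) = 2*(m &&& n) := by
  simpa only [Bool.toNat_true, Bool.toNat_false, Bool.and_true, Bool.and_false, Bool.true_and,
    Bool.false_and, Bool.or_true, Bool.or_false, Bool.true_or, Bool.false_or, bne_self_eq_false,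
    Bool.false_bne, Bool.true_bne, Bool.not_true, Bool.not_false, Bool.bne_false, Bool.bne_true,
    Nat.add_zero] using natAndHalf true false m n

lemma natAndH11 (m n : Nat) : (2*m+1) &&& (2*n+1) = 2*(m &&& n)+1 := by
  simpa only [Bool.toNat_true, Bool.toNat_false, Bool.and_true, Bool.and_false, Bool.true_and,
    Bool.false_and, Bool.or_true, Bool.or_false, Bool.true_or, Bool.false_or, bne_self_eq_false,
    Bool.false_bne, Bool.true_bne, Bool.not_true, Bool.not_false, Bool.bne_false, Bool.bne_true,
    Nat.add_zero] using natAndHalf true true m n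

lemma natOrH00 (m n : Nat) : (2*m) ||| (2*n) = 2*(m ||| n) := by
  simpa only [Bool.toNat_true, Bool.toNat_false, Bool.and_true, Bool.and_false, Bool.true_and,
    Bool.false_and, Bool.or_true, Bool.or_false, Bool.true_or, Bool.false_or, bne_self_eq_false,
    Bool.false_bne, Bool.true_bne, Bool.not_true, Bool.not_false, Bool.bne_false, Bool.bne_true,
    Nat.add_zero] using natOrHalf false false m n

lemma natOrH01 (m n : Nat) : (2*m) ||| (2*n+1) = 2*(m ||| n)+1 := by
  simpa only [Bool.toNat_true, Bool.toNat_false, Bool.and_true, Bool.and_false, Bool.true_and,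
    Bool.false_and, Bool.or_true, Bool.or_false, Bool.true_or, Bool.false_or, bne_self_eq_false,
    Bool.false_bne, Bool.true_bne, Bool.not_true, Bool.not_false, Bool.bne_false, Bool.bne_true,
    Nat.add_zero] using natOrHalf false true m n

lemma natOrH10 (m n : Nat) : (2*m+1) ||| (2*n) = 2*(m ||| n)+1 := by
  simpa only [Bool.toNat_true, Bool.toNat_false, Bool.and_true, Bool.and_false, Bool.true_and,
    Bool.false_and, Bool.or_true, Bool.or_false, Bool.true_or, Bool.false_or, bne_self_eq_false,
    Bool.false_bne, Bool.true_bne, Bool.not_true, Bool.not_false, Bool.bne_false, Bool.bne_true,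
    Nat.add_zero] using natOrHalf true false m n

lemma natOrH11 (m n : Nat) : (2*m+1) ||| (2*n+1) = 2*(m ||| n)+1 := by
  simpa only [Bool.toNat_true, Bool.toNat_false, Bool.and_true, Bool.and_false, Bool.true_and,
    Bool.false_and, Bool.or_true, Bool.or_false, Bool.true_or, Bool.false_or, bne_self_eq_false,
    Bool.false_bne, Bool.true_bne, Bool.not_true, Bool.not_false, Bool.bne_false, Bool.bne_true,
    Nat.add_zero] using natOrHalf true true m n

lemma natXorH00 (m n : Nat) : (2*m) ^^^ (2*n) = 2*(m ^^^ n) := by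
  simpa only [Bool.toNat_true, Bool.toNat_false, Bool.and_true, Bool.and_false, Bool.true_and,
    Bool.false_and, Bool.or_true, Bool.or_false, Bool.true_or, Bool.false_or, bne_self_eq_false,
    Bool.false_bne, Bool.true_bne, Bool.not_true, Bool.not_false, Bool.bne_false, Bool.bne_true,
    Nat.add_zero] using natXorHalf false false m n

lemma natXorH01 (m n : Nat) : (2*m) ^^^ (2*n+1) = 2*(m ^^^ n)+1 := by
  simpa only [Bool.toNat_true, Bool.toNat_false, Bool.and_true, Bool.and_false, Bool.true_and,
    Bool.false_and, Bool.or_true, Bool.or_false, Bool.true_or, Bool.false_or, bne_self_eq_false,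
    Bool.false_bne, Bool.true_bne, Bool.not_true, Bool.not_false, Bool.bne_false, Bool.bne_true,
    Nat.add_zero] using natXorHalf false true m n

lemma natXorH10 (m n : Nat) : (2*m+1) ^^^ (2*n) = 2*(m ^^^ n)+1 := by
  simpa only [Bool.toNat_true, Bool.toNat_false, Bool.and_true, Bool.and_false, Bool.true_and,
    Bool.false_and, Bool.or_true, Bool.or_false, Bool.true_or, Bool.false_or, bne_self_eq_false,
    Bool.false_bne, Bool.true_bne, Bool.not_true, Bool.not_false, Bool.bne_false, Bool.bne_true,
    Nat.add_zero] using natXorHalf true false m n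

lemma natXorH11 (m n : Nat) : (2*m+1) ^^^ (2*n+1) = 2*(m ^^^ n) := by
  simpa only [Bool.toNat_true, Bool.toNat_false, Bool.and_true, Bool.and_false, Bool.true_and,
    Bool.false_and, Bool.or_true, Bool.or_false, Bool.true_or, Bool.false_or, bne_self_eq_false,
    Bool.false_bne, Bool.true_bne, Bool.not_true, Bool.not_false, Bool.bne_false, Bool.bne_true,
    Nat.add_zero] using natXorHalf true true m n
lemma pvBandHalfMixed (a b e f : Int) (he : e = 0 ∨ e = 1) (hf : f = 0 ∨ f = 1)
    (ha : 0 ≤ a) (hb : 0 < -b) :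
    PySem.Int.band (2*a+e) (2*b+f) = 2 * PySem.Int.band a b + e*f := by
  simp only [PySem.Int.band, if_pos ha, if_neg (by omega : ¬ (0:Int) ≤ b),
    if_pos (by omega : (0:Int) ≤ 2*a+e), if_neg (by omega : ¬ (0:Int) ≤ 2*b+f)]
  rcases he with rfl | rfl <;> rcases hf with rfl | rfl
  · -- e=0, f=0
    have hle : a.toNat &&& (-b-1).toNat ≤ a.toNat := Nat.and_le_left
    rw [(by omega : (2*a+0).toNat = 2*a.toNat), (by omega : (-(2*b+0)-1).toNat = 2*(-b-1).toNat+1), natAndH01]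
    omega
  · -- e=0, f=1
    have hle : a.toNat &&& (-b-1).toNat ≤ a.toNat := Nat.and_le_left
    rw [(by omega : (2*a+0).toNat = 2*a.toNat), (by omega : (-(2*b+1)-1).toNat = 2*(-b-1).toNat), natAndH00]
    omega
  · -- e=1, f=0
    have hle : a.toNat &&& (-b-1).toNat ≤ a.toNat := Nat.and_le_left
    rw [(by omega : (2*a+1).toNat = 2*a.toNat+1), (by omega : (-(2*b+0)-1).toNat = 2*(-b-1).toNat+1), natAndH11]
    omega
  · -- e=1, f=1
    have hle : a.toNat &&& (-b-1).toNat ≤ a.toNat := Nat.and_le_left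
    rw [(by omega : (2*a+1).toNat = 2*a.toNat+1), (by omega : (-(2*b+1)-1).toNat = 2*(-b-1).toNat), natAndH10]
    omega

lemma pvBandHalf (a b e f : Int) (he : e = 0 ∨ e = 1) (hf : f = 0 ∨ f = 1) :
    PySem.Int.band (2*a+e) (2*b+f) = 2 * PySem.Int.band a b + e*f := by
  rcases le_or_gt (0:Int) a with ha | ha <;> rcases le_or_gt (0:Int) b with hb | hb
  · simp only [PySem.Int.band, if_pos ha, if_pos hb,
      if_pos (by omega : (0:Int) ≤ 2*a+e), if_pos (by omega : (0:Int) ≤ 2*b+f)]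
    rcases he with rfl | rfl <;> rcases hf with rfl | rfl
    · rw [(by omega : (2*a+0).toNat = 2*a.toNat), (by omega : (2*b+0).toNat = 2*b.toNat), natAndH00]
      omega
    · rw [(by omega : (2*a+0).toNat = 2*a.toNat), (by omega : (2*b+1).toNat = 2*b.toNat+1), natAndH01]
      omega
    · rw [(by omega : (2*a+1).toNat = 2*a.toNat+1), (by omega : (2*b+0).toNat = 2*b.toNat), natAndH10]
      omega
    · rw [(by omega : (2*a+1).toNat = 2*a.toNat+1), (by omega : (2*b+1).toNat = 2*b.toNat+1), natAndH11]
      omega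
  · exact pvBandHalfMixed a b e f he hf ha (by omega)
  · rw [PySem.Int.band_comm, PySem.Int.band_comm a b,
      pvBandHalfMixed b a f e hf he hb (by omega)]
    ring
  · simp only [PySem.Int.band, if_neg (by omega : ¬ (0:Int) ≤ a), if_neg (by omega : ¬ (0:Int) ≤ b),
      if_neg (by omega : ¬ (0:Int) ≤ 2*a+e), if_neg (by omega : ¬ (0:Int) ≤ 2*b+f)]
    rcases he with rfl | rfl <;> rcases hf with rfl | rfl
    · rw [(by omega : (-(2*a+0)-1).toNat = 2*(-a-1).toNat+1), (by omega : (-(2*b+0)-1).toNat = 2*(-b-1).toNat+1), natOrH11]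
      omega
    · rw [(by omega : (-(2*a+0)-1).toNat = 2*(-a-1).toNat+1), (by omega : (-(2*b+1)-1).toNat = 2*(-b-1).toNat), natOrH10]
      omega
    · rw [(by omega : (-(2*a+1)-1).toNat = 2*(-a-1).toNat), (by omega : (-(2*b+0)-1).toNat = 2*(-b-1).toNat+1), natOrH01]
      omega
    · rw [(by omega : (-(2*a+1)-1).toNat = 2*(-a-1).toNat), (by omega : (-(2*b+1)-1).toNat = 2*(-b-1).toNat), natOrH00]
      omega

lemma pvBorHalfMixed (a b e f : Int) (he : e = 0 ∨ e = 1) (hf : f = 0 ∨ f = 1)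
    (ha : 0 ≤ a) (hb : 0 < -b) :
    PySem.Int.bor (2*a+e) (2*b+f) = 2 * PySem.Int.bor a b + (e + f - e*f) := by
  simp only [PySem.Int.bor, if_pos ha, if_neg (by omega : ¬ (0:Int) ≤ b),
    if_pos (by omega : (0:Int) ≤ 2*a+e), if_neg (by omega : ¬ (0:Int) ≤ 2*b+f)]
  rcases he with rfl | rfl <;> rcases hf with rfl | rfl
  · -- e=0, f=0
    have hle : (-b-1).toNat &&& a.toNat ≤ (-b-1).toNat := Nat.and_le_left
    rw [(by omega : (-(2*b+0)-1).toNat = 2*(-b-1).toNat+1), (by omega : (2*a+0).toNat = 2*a.toNat), natAndH10]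
    omega
  · -- e=0, f=1
    have hle : (-b-1).toNat &&& a.toNat ≤ (-b-1).toNat := Nat.and_le_left
    rw [(by omega : (-(2*b+1)-1).toNat = 2*(-b-1).toNat), (by omega : (2*a+0).toNat = 2*a.toNat), natAndH00]
    omega
  · -- e=1, f=0
    have hle : (-b-1).toNat &&& a.toNat ≤ (-b-1).toNat := Nat.and_le_left
    rw [(by omega : (-(2*b+0)-1).toNat = 2*(-b-1).toNat+1), (by omega : (2*a+1).toNat = 2*a.toNat+1), natAndH11]
    omega
  · -- e=1, f=1
    have hle : (-b-1).toNat &&& a.toNat ≤ (-b-1).toNat := Nat.and_le_left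
    rw [(by omega : (-(2*b+1)-1).toNat = 2*(-b-1).toNat), (by omega : (2*a+1).toNat = 2*a.toNat+1), natAndH01]
    omega

lemma pvBorHalf (a b e f : Int) (he : e = 0 ∨ e = 1) (hf : f = 0 ∨ f = 1) :
    PySem.Int.bor (2*a+e) (2*b+f) = 2 * PySem.Int.bor a b + (e + f - e*f) := by
  rcases le_or_gt (0:Int) a with ha | ha <;> rcases le_or_gt (0:Int) b with hb | hb
  · simp only [PySem.Int.bor, if_pos ha, if_pos hb,
      if_pos (by omega : (0:Int) ≤ 2*a+e), if_pos (by omega : (0:Int) ≤ 2*b+f)]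
    rcases he with rfl | rfl <;> rcases hf with rfl | rfl
    · rw [(by omega : (2*a+0).toNat = 2*a.toNat), (by omega : (2*b+0).toNat = 2*b.toNat), natOrH00]
      omega
    · rw [(by omega : (2*a+0).toNat = 2*a.toNat), (by omega : (2*b+1).toNat = 2*b.toNat+1), natOrH01]
      omega
    · rw [(by omega : (2*a+1).toNat = 2*a.toNat+1), (by omega : (2*b+0).toNat = 2*b.toNat), natOrH10]
      omega
    · rw [(by omega : (2*a+1).toNat = 2*a.toNat+1), (by omega : (2*b+1).toNat = 2*b.toNat+1), natOrH11]
      omega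
  · exact pvBorHalfMixed a b e f he hf ha (by omega)
  · rw [PySem.Int.bor_comm, PySem.Int.bor_comm a b,
      pvBorHalfMixed b a f e hf he hb (by omega)]
    ring
  · simp only [PySem.Int.bor, if_neg (by omega : ¬ (0:Int) ≤ a), if_neg (by omega : ¬ (0:Int) ≤ b),
      if_neg (by omega : ¬ (0:Int) ≤ 2*a+e), if_neg (by omega : ¬ (0:Int) ≤ 2*b+f)]
    rcases he with rfl | rfl <;> rcases hf with rfl | rfl
    · rw [(by omega : (-(2*a+0)-1).toNat = 2*(-a-1).toNat+1), (by omega : (-(2*b+0)-1).toNat = 2*(-b-1).toNat+1), natAndH11]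
      omega
    · rw [(by omega : (-(2*a+0)-1).toNat = 2*(-a-1).toNat+1), (by omega : (-(2*b+1)-1).toNat = 2*(-b-1).toNat), natAndH10]
      omega
    · rw [(by omega : (-(2*a+1)-1).toNat = 2*(-a-1).toNat), (by omega : (-(2*b+0)-1).toNat = 2*(-b-1).toNat+1), natAndH01]
      omega
    · rw [(by omega : (-(2*a+1)-1).toNat = 2*(-a-1).toNat), (by omega : (-(2*b+1)-1).toNat = 2*(-b-1).toNat), natAndH00]
      omega

lemma pvBxorHalfMixed (a b e f : Int) (he : e = 0 ∨ e = 1) (hf : f = 0 ∨ f = 1)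
    (ha : 0 ≤ a) (hb : 0 < -b) :
    PySem.Int.bxor (2*a+e) (2*b+f) = 2 * PySem.Int.bxor a b + (e + f - 2*e*f) := by
  simp only [PySem.Int.bxor, if_pos ha, if_neg (by omega : ¬ (0:Int) ≤ b),
    if_pos (by omega : (0:Int) ≤ 2*a+e), if_neg (by omega : ¬ (0:Int) ≤ 2*b+f)]
  rcases he with rfl | rfl <;> rcases hf with rfl | rfl
  · -- e=0, f=0
    rw [(by omega : (2*a+0).toNat = 2*a.toNat), (by omega : (-(2*b+0)-1).toNat = 2*(-b-1).toNat+1), natXorH01]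
    omega
  · -- e=0, f=1
    rw [(by omega : (2*a+0).toNat = 2*a.toNat), (by omega : (-(2*b+1)-1).toNat = 2*(-b-1).toNat), natXorH00]
    omega
  · -- e=1, f=0
    rw [(by omega : (2*a+1).toNat = 2*a.toNat+1), (by omega : (-(2*b+0)-1).toNat = 2*(-b-1).toNat+1), natXorH11]
    omega
  · -- e=1, f=1
    rw [(by omega : (2*a+1).toNat = 2*a.toNat+1), (by omega : (-(2*b+1)-1).toNat = 2*(-b-1).toNat), natXorH10]
    omega

lemma pvBxorHalf (a b e f : Int) (he : e = 0 ∨ e = 1) (hf : f = 0 ∨ f = 1) :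
    PySem.Int.bxor (2*a+e) (2*b+f) = 2 * PySem.Int.bxor a b + (e + f - 2*e*f) := by
  rcases le_or_gt (0:Int) a with ha | ha <;> rcases le_or_gt (0:Int) b with hb | hb
  · simp only [PySem.Int.bxor, if_pos ha, if_pos hb,
      if_pos (by omega : (0:Int) ≤ 2*a+e), if_pos (by omega : (0:Int) ≤ 2*b+f)]
    rcases he with rfl | rfl <;> rcases hf with rfl | rfl
    · rw [(by omega : (2*a+0).toNat = 2*a.toNat), (by omega : (2*b+0).toNat = 2*b.toNat), natXorH00]
      omega
    · rw [(by omega : (2*a+0).toNat = 2*a.toNat), (by omega : (2*b+1).toNat = 2*b.toNat+1), natXorH01]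
      omega
    · rw [(by omega : (2*a+1).toNat = 2*a.toNat+1), (by omega : (2*b+0).toNat = 2*b.toNat), natXorH10]
      omega
    · rw [(by omega : (2*a+1).toNat = 2*a.toNat+1), (by omega : (2*b+1).toNat = 2*b.toNat+1), natXorH11]
      omega
  · exact pvBxorHalfMixed a b e f he hf ha (by omega)
  · rw [PySem.Int.bxor_comm, PySem.Int.bxor_comm a b,
      pvBxorHalfMixed b a f e hf he hb (by omega)]
    ring
  · simp only [PySem.Int.bxor, if_neg (by omega : ¬ (0:Int) ≤ a), if_neg (by omega : ¬ (0:Int) ≤ b),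
      if_neg (by omega : ¬ (0:Int) ≤ 2*a+e), if_neg (by omega : ¬ (0:Int) ≤ 2*b+f)]
    rcases he with rfl | rfl <;> rcases hf with rfl | rfl
    · rw [(by omega : (-(2*a+0)-1).toNat = 2*(-a-1).toNat+1), (by omega : (-(2*b+0)-1).toNat = 2*(-b-1).toNat+1), natXorH11]
      omega
    · rw [(by omega : (-(2*a+0)-1).toNat = 2*(-a-1).toNat+1), (by omega : (-(2*b+1)-1).toNat = 2*(-b-1).toNat), natXorH10]
      omega
    · rw [(by omega : (-(2*a+1)-1).toNat = 2*(-a-1).toNat), (by omega : (-(2*b+0)-1).toNat = 2*(-b-1).toNat+1), natXorH01]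
      omega
    · rw [(by omega : (-(2*a+1)-1).toNat = 2*(-a-1).toNat), (by omega : (-(2*b+1)-1).toNat = 2*(-b-1).toNat), natXorH00]
      omega
-- a & ~a = 0
lemma pvBandComplAux (n : Nat) : ∀ a : Int, a.natAbs ≤ n → PySem.Int.band a (-a-1) = 0 := by
  induction n with
  | zero =>
    intro a ha
    have h0 : a = 0 := by omega
    subst h0; decide
  | succ n ih =>
    intro a ha
    by_cases h0 : a = 0; · subst h0; decide
    by_cases h1 : a = -1; · subst h1; decide
    obtain ⟨q, r, hr, hq, rfl⟩ : ∃ q r, (r = 0 ∨ r = 1) ∧ q.natAbs ≤ n ∧ a = 2*q + r :=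
      ⟨a/2, a%2, by omega, by omega, by omega⟩
    rw [(by omega : -(2*q+r)-1 = 2*(-q-1) + (1-r)),
      pvBandHalf q (-q-1) r (1-r) hr (by omega), ih q hq]
    rcases hr with rfl | rfl <;> norm_num
lemma pvBandCompl (a : Int) : PySem.Int.band a (-a-1) = 0 :=
  pvBandComplAux a.natAbs a le_rfl

lemma intShl1 (x : Int) : x <<< (1 : Nat) = 2*x := by
  rw [Int.shiftLeft_eq]; ring
lemma intShr1 (x : Int) : x >>> (1 : Nat) = x / 2 := by
  simpa using Int.shiftRight_eq_div_pow x 1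

lemma pvBandEven (v x : Int) : PySem.Int.band v (2*x) = 2 * PySem.Int.band (v/2) x := by
  have h := pvBandHalf (v/2) x (v%2) 0 (by omega) (by omega)
  norm_num at h
  calc PySem.Int.band v (2*x) = PySem.Int.band (2*(v/2)+v%2) (2*x) := by
        rw [show 2*(v/2)+v%2 = v by omega]
    _ = 2 * PySem.Int.band (v/2) x := h

lemma pvBneTwoMul (y : Int) : ((2*y : Int) != 0) = (y != 0) := by
  rcases eq_or_ne y 0 with rfl | hy
  · norm_num
  · have h2 : (2*y : Int) ≠ 0 := by omega
    simp [bne, h2, hy]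

lemma pvLoopAHalf : ∀ (fuel : Nat) (v m : Int) (fb nb : Bool),
    pvLoopA v fuel (2*m) fb nb = 2 * pvLoopA (v / 2) fuel m fb nb := by
  intro fuel
  induction fuel with
  | zero => intro v m fb nb; rfl
  | succ n ih =>
    intro v m fb nb
    by_cases h : fb = nb
    · simp only [pvLoopA, if_pos h, intShl1]
      rw [show (2*(2*m) : Int) = 2*(2*m) from rfl, pvBandEven v (2*m), pvBneTwoMul]
      exact ih v (2*m) nb _
    · simp [pvLoopA, h]

-- A with the fuel as a parameter (the port instantiates it at 64)
def pvA (v : Int) (fuel : Nat) : Int :=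
  let mask := pvLoopA v fuel 2 (PySem.Int.band v 1 != 0) (PySem.Int.band v 2 != 0)
  PySem.Int.bxor v (PySem.Int.bor mask (mask >>> (1 : Nat)))

lemma pvAEq (v : Int) : get_closest_value_with_same_weight v = pvA v 64 := by
  norm_num [get_closest_value_with_same_weight, pvA, intShl1]

lemma pvAltFormula (v : Int) : get_closest_value_with_same_weight_alt v =
    PySem.Int.bxor v (PySem.Int.bor (PySem.Int.band (PySem.Int.bxor v (v/2)) (-(PySem.Int.bxor v (v/2))))
      (2 * PySem.Int.band (PySem.Int.bxor v (v/2)) (-(PySem.Int.bxor v (v/2))))) := by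
  simp only [get_closest_value_with_same_weight_alt, intShr1, intShl1]

lemma pvAltBase (v : Int) (h : v % 2 ≠ (v/2) % 2) :
    get_closest_value_with_same_weight_alt v = PySem.Int.bxor v 3 := by
  rw [pvAltFormula]
  have hd : PySem.Int.bxor v (v/2) = 2 * PySem.Int.bxor (v/2) (v/2/2) + 1 := by
    have h1 := pvBxorHalf (v/2) (v/2/2) (v%2) ((v/2)%2) (by omega) (by omega)
    rw [show 2*(v/2)+v%2 = v by omega, show 2*(v/2/2)+(v/2)%2 = v/2 by omega] at h1
    rw [h1]
    rcases (by omega : v%2 = 0 ∨ v%2 = 1) with h0|h0 <;>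
      rcases (by omega : (v/2)%2 = 0 ∨ (v/2)%2 = 1) with h2|h2 <;>
      rw [h0, h2] at h ⊢ <;> omega
  set X := PySem.Int.bxor (v/2) (v/2/2) with hX
  rw [hd]
  have hlow : PySem.Int.band (2*X+1) (-(2*X+1)) = 1 := by
    rw [show -(2*X+1) = 2*(-X-1)+1 by ring,
      pvBandHalf X (-X-1) 1 1 (by omega) (by omega), pvBandCompl]
    ring
  rw [hlow]
  norm_num [show PySem.Int.bor 1 2 = 3 by decide]

lemma pvAltRec (v : Int) (h : v % 2 = (v/2) % 2) :
    get_closest_value_with_same_weight_alt v =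
      2 * get_closest_value_with_same_weight_alt (v/2) + v % 2 := by
  rw [pvAltFormula, pvAltFormula (v/2)]
  have hd : PySem.Int.bxor v (v/2) = 2 * PySem.Int.bxor (v/2) (v/2/2) := by
    have h1 := pvBxorHalf (v/2) (v/2/2) (v%2) ((v/2)%2) (by omega) (by omega)
    rw [show 2*(v/2)+v%2 = v by omega, show 2*(v/2/2)+(v/2)%2 = v/2 by omega] at h1
    rw [h1]
    rcases (by omega : v%2 = 0 ∨ v%2 = 1) with h0|h0 <;>
      rw [h0] at h ⊢ <;> rw [← h] <;> norm_num
  set X := PySem.Int.bxor (v/2) (v/2/2) with hX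
  rw [hd]
  have hlow : PySem.Int.band (2*X) (-(2*X)) = 2 * PySem.Int.band X (-X) := by
    have h1 := pvBandHalf X (-X) 0 0 (by omega) (by omega)
    norm_num at h1
    exact h1
  set L := PySem.Int.band X (-X) with hL
  rw [hlow]
  have hbor : PySem.Int.bor (2*L) (2*(2*L)) = 2 * PySem.Int.bor L (2*L) := by
    have h1 := pvBorHalf L (2*L) 0 0 (by omega) (by omega)
    norm_num at h1
    exact h1
  rw [hbor]
  have hx := pvBxorHalf (v/2) (PySem.Int.bor L (2*L)) (v%2) 0 (by omega) (by omega)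
  rw [show 2*(v/2)+v%2 = v by omega] at hx
  norm_num at hx
  rw [hx]

lemma pvBandOne (v : Int) : PySem.Int.band v 1 = v % 2 := by
  rw [PySem.Int.band_one, PySem.Int.mod_eq_emod_of_pos (by norm_num)]

lemma pvBandTwo (v : Int) : PySem.Int.band v 2 = 2 * ((v/2) % 2) := by
  rw [show (2:Int) = 2*1 by norm_num, pvBandEven, pvBandOne]
  norm_num

lemma pvFbEq (v : Int) : (PySem.Int.band v 1 != 0) = decide (v % 2 = 1) := by
  rw [pvBandOne]
  rcases (by omega : v%2 = 0 ∨ v%2 = 1) with h0|h0 <;> rw [h0] <;> decide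

lemma pvNbEq (v : Int) : (PySem.Int.band v 2 != 0) = decide ((v/2) % 2 = 1) := by
  rw [pvBandTwo, pvBneTwoMul]
  rcases (by omega : (v/2)%2 = 0 ∨ (v/2)%2 = 1) with h0|h0 <;> rw [h0] <;> decide

lemma pvABase (v : Int) (fuel : Nat) (h : v % 2 ≠ (v/2) % 2) :
    pvA v (fuel+1) = PySem.Int.bxor v 3 := by
  have hne : (PySem.Int.band v 1 != 0) ≠ (PySem.Int.band v 2 != 0) := by
    rw [pvFbEq, pvNbEq]
    rcases (by omega : v%2 = 0 ∨ v%2 = 1) with h0|h0 <;>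
      rcases (by omega : (v/2)%2 = 0 ∨ (v/2)%2 = 1) with h2|h2 <;>
      rw [h0, h2] at h ⊢ <;> first | omega | decide
  simp only [pvA, pvLoopA, if_neg hne]
  norm_num [show ((2:Int) >>> (1:Nat)) = 1 by decide, show PySem.Int.bor 2 1 = 3 by decide]

lemma pvARec (v : Int) (fuel : Nat) (h : v % 2 = (v/2) % 2) :
    pvA v (fuel+1) = 2 * pvA (v/2) fuel + v % 2 := by
  have heq : (PySem.Int.band v 1 != 0) = (PySem.Int.band v 2 != 0) := by
    rw [pvFbEq, pvNbEq, h]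
  have hM : pvLoopA v (fuel+1) 2 (PySem.Int.band v 1 != 0) (PySem.Int.band v 2 != 0) =
      2 * pvLoopA (v/2) fuel 2 (PySem.Int.band (v/2) 1 != 0) (PySem.Int.band (v/2) 2 != 0) := by
    simp only [pvLoopA, if_pos heq, intShl1]
    rw [show ((2:Int)*2) = 2*2 from rfl]
    have h4 : (PySem.Int.band v (2*2) != 0) = (PySem.Int.band (v/2) 2 != 0) := by
      rw [pvBandEven, pvBneTwoMul]
    rw [h4, pvLoopAHalf]
    congr 1
    rw [pvNbEq, pvFbEq]
  simp only [pvA]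
  rw [hM]
  set fb := (PySem.Int.band (v/2) 1 != 0)
  set nb := (PySem.Int.band (v/2) 2 != 0)
  have hMM : pvLoopA (v/2) fuel 2 fb nb = 2 * pvLoopA (v/2/2) fuel 1 fb nb := by
    have h1 := pvLoopAHalf fuel (v/2) 1 fb nb
    norm_num at h1
    exact h1
  set M2 := pvLoopA (v/2/2) fuel 1 fb nb
  rw [hMM, intShr1, intShr1, show (2*(2*M2))/2 = 2*M2 by omega, show (2*M2)/2 = M2 by omega]
  have hbor : PySem.Int.bor (2*(2*M2)) (2*M2) = 2 * PySem.Int.bor (2*M2) M2 := by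
    have h1 := pvBorHalf (2*M2) M2 0 0 (by omega) (by omega)
    norm_num at h1
    exact h1
  rw [hbor]
  have hx := pvBxorHalf (v/2) (PySem.Int.bor (2*M2) M2) (v%2) 0 (by omega) (by omega)
  rw [show 2*(v/2)+v%2 = v by omega] at hx
  norm_num at hx
  rw [hx]


lemma pvMain : ∀ (fuel : Nat) (v : Int), v ≠ 0 → v ≠ -1 → v.natAbs ≤ 2^fuel →
    pvA v fuel = get_closest_value_with_same_weight_alt v := by
  intro fuel
  induction fuel with
  | zero =>
    intro v h0 h1 hb
    norm_num at hb
    have : v = 1 := by omega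
    subst this; decide
  | succ n ih =>
    intro v h0 h1 hb
    by_cases hp : v % 2 = (v/2) % 2
    · have hv2 : v / 2 ≠ 0 := by omega
      have hv1 : v / 2 ≠ -1 := by omega
      have hb2 : (v/2).natAbs ≤ 2^n := by
        have hpow : (2:Nat)^(n+1) = 2^n * 2 := pow_succ 2 n
        omega
      rw [pvARec v n hp, ih (v/2) hv2 hv1 hb2, ← pvAltRec v hp]
    · rw [pvABase v n hp, ← pvAltBase v hp]

-- ===== VERDICT (by name: the statement is the Claim_ definition above) =====
theorem get_closest_value_with_same_weight_spec : Claim_equal_get_closest_value_with_same_weight := by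
  intro v hdom hpre
  obtain ⟨h0, h1⟩ := hpre
  unfold Spec_get_closest_value_with_same_weight
  rw [pvAEq]
  apply pvMain 64 v h0 h1
  unfold Dom_get_closest_value_with_same_weight pvDomInt at hdom
  simp only [decide_eq_true_eq] at hdom
  have : (2:Nat)^64 = 18446744073709551616 := by norm_num
  omega
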